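-- pv_equiv track=rewrite | github.com/syzsky/LCA | ui/workflow_parts/workflow_task_manager.py | _resolve_execution_result
-- ===== SOURCE A (Python) =====
-- from typing import Dict, List, Optional, Any, Set, Tuple
--
-- def _resolve_execution_result(task_statuses: List[str]) -> Tuple[bool, str]:
--     normalized_statuses = [
--         str(status or "").strip().lower()
--         for status in task_statuses
--         if str(status or "").strip()
--     ]
--
--     if any(status == 'stopped' for status in normalized_statuses):
--         return False, 'stopped'
--
--     if normalized_statuses and all(status == 'completed' for status in normalized_statuses):
--         return True, 'completed'
--
--     return False, 'failed'
-- ===== SOURCE B (Python) =====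
-- def _resolve_execution_result(task_statuses):
--     saw_any = False
--     all_completed = True
--     for status in task_statuses:
--         s = str(status or "").strip().lower()
--         if not s:
--             continue
--         if s == 'stopped':
--             return False, 'stopped'
--         saw_any = True
--         if s != 'completed':
--             all_completed = False
--     if saw_any and all_completed:
--         return True, 'completed'
--     return False, 'failed'
-- ===== Notes on version B (the rewrite author's own statement) =====
-- stated objective: alternative
-- what changed: Single explicit pass with an early return on 'stopped' and two accumulator flags (saw_any, all_completed), instead of building a normalized list and running separate any() and all() scans over it.
import Mathlib
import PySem

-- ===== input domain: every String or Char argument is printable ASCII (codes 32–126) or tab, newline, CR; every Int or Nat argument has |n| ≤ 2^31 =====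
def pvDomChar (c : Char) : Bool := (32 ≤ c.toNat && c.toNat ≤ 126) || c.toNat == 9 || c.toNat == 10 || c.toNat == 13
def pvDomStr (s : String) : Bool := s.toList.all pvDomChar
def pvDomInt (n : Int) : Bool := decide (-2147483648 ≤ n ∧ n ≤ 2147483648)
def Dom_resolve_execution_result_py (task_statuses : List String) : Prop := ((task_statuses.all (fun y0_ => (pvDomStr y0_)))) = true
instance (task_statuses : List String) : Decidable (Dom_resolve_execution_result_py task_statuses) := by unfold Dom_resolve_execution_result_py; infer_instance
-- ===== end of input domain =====

-- B is a single explicit pass with an early return on 'stopped' and two accumulator flags, instead of A's normalized list plus separate any()/all() scans.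


-- ===== PORT A =====
-- literal port: list comprehension (filter + map), then any(== 'stopped'), then nonempty && all(== 'completed')
def resolve_execution_result_py (task_statuses : List String) : Bool × String :=
  let normalized_statuses : List String :=
    (task_statuses.filter (fun status => decide (PySem.Str.strip status ≠ ""))).map
      (fun status => PySem.Str.lower (PySem.Str.strip status))
  if normalized_statuses.any (fun status => status == "stopped") then (false, "stopped")
  else if (!normalized_statuses.isEmpty) && normalized_statuses.all (fun status => status == "completed") then
    (true, "completed")
  else (false, "failed")

-- ===== PORT B =====
-- literal port of Source B: one explicit loop carrying (saw_any, all_completed), early return on 'stopped'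
def pvAltLoop : List String → Bool → Bool → Bool × String
  | [], saw_any, all_completed =>
      if saw_any && all_completed then (true, "completed") else (false, "failed")
  | status :: rest, saw_any, all_completed =>
      let s := PySem.Str.lower (PySem.Str.strip status)
      if s = "" then pvAltLoop rest saw_any all_completed
      else if s = "stopped" then (false, "stopped")
      else pvAltLoop rest true (all_completed && (s == "completed"))

def resolve_execution_result_py_alt (task_statuses : List String) : Bool × String :=
  pvAltLoop task_statuses false true

-- ===== PRECONDITION & SPEC =====
def Spec_resolve_execution_result_py (task_statuses : List String) (out : Bool × String) : Prop := out = resolve_execution_result_py_alt task_statuses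
instance (task_statuses : List String) (out : Bool × String) : Decidable (Spec_resolve_execution_result_py task_statuses out) := by unfold Spec_resolve_execution_result_py; infer_instance

-- ===== CLAIM (what is proved, stated in full; the proofs are below) =====
def Claim_equal_resolve_execution_result_py : Prop := ∀ (task_statuses : List String), Dom_resolve_execution_result_py task_statuses → Spec_resolve_execution_result_py task_statuses (resolve_execution_result_py task_statuses)

-- ===== LEMMAS AND PROOFS =====

-- A's normalized list
def pvNorm (l : List String) : List String :=
  (l.filter (fun status => decide (PySem.Str.strip status ≠ ""))).map
    (fun status => PySem.Str.lower (PySem.Str.strip status))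

-- lower of a nonempty string is nonempty (lowercasing preserves length)
theorem pv_lower_ne_empty (s : String) (h : s ≠ "") : PySem.Str.lower s ≠ "" := by
  intro hc
  apply h
  have h1 := PySem.Str.toList_lower s
  rw [hc] at h1
  have hlen : (PySem.Chars.lower s.toList).length = s.toList.length := by
    simp [PySem.Chars.lower]
  rw [← h1] at hlen
  have h2 : s.toList = [] := List.length_eq_zero_iff.mp (by simpa using hlen.symm)
  have := congrArg String.ofList h2
  simpa using this

theorem pv_lower_empty : PySem.Str.lower "" = "" := by decide

-- loop invariant: pvAltLoop computes A's verdict on pvNorm l, relative to the carried flags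
theorem pv_loop_eq (l : List String) (saw_any all_completed : Bool) :
    pvAltLoop l saw_any all_completed =
      (if (pvNorm l).any (fun status => status == "stopped") then (false, "stopped")
       else if (saw_any || !(pvNorm l).isEmpty) && all_completed
              && (pvNorm l).all (fun status => status == "completed") then (true, "completed")
       else (false, "failed")) := by
  induction l generalizing saw_any all_completed with
  | nil => simp [pvAltLoop, pvNorm]
  | cons hd tl ih =>
    by_cases h : PySem.Str.strip hd = ""
    · have h0 : PySem.Str.lower (PySem.Str.strip hd) = "" := by rw [h]; exact pv_lower_empty
      have hn : pvNorm (hd :: tl) = pvNorm tl := by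
        simp [pvNorm, h]
      rw [hn]
      rw [show pvAltLoop (hd :: tl) saw_any all_completed
            = pvAltLoop tl saw_any all_completed by
        simp [pvAltLoop, h0]]
      exact ih saw_any all_completed
    · have hne : PySem.Str.lower (PySem.Str.strip hd) ≠ "" := pv_lower_ne_empty _ h
      have hn : pvNorm (hd :: tl) = PySem.Str.lower (PySem.Str.strip hd) :: pvNorm tl := by
        simp [pvNorm, h]
      rw [hn]
      by_cases hs : PySem.Str.lower (PySem.Str.strip hd) = "stopped"
      · rw [show pvAltLoop (hd :: tl) saw_any all_completed = (false, "stopped") by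
          simp [pvAltLoop, hs]]
        simp [hs]
      · rw [show pvAltLoop (hd :: tl) saw_any all_completed
              = pvAltLoop tl true
                  (all_completed && (PySem.Str.lower (PySem.Str.strip hd) == "completed")) by
          simp [pvAltLoop, hne, hs]]
        rw [ih]
        have hany : ((PySem.Str.lower (PySem.Str.strip hd) :: pvNorm tl).any
            (fun status => status == "stopped"))
            = (pvNorm tl).any (fun status => status == "stopped") := by
          simp [List.any_cons, hs]
        rw [hany]
        by_cases ha : (pvNorm tl).any (fun status => status == "stopped") = true
        · simp [ha]
        · simp only [Bool.not_eq_true] at ha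
          simp only [ha, Bool.false_eq_true, if_false]
          cases all_completed <;>
            cases hsc : (PySem.Str.lower (PySem.Str.strip hd) == "completed") <;>
            simp [hsc, List.all_cons]

-- ===== VERDICT (by name: the statement is the Claim_ definition above) =====
theorem resolve_execution_result_py_spec : Claim_equal_resolve_execution_result_py := by
  intro ts _
  unfold Spec_resolve_execution_result_py resolve_execution_result_py resolve_execution_result_py_alt
  rw [pv_loop_eq]
  simp only [pvNorm, Bool.false_or, Bool.and_true]
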